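-- pv_equiv track=rewrite | github.com/MycosoftLabs/mycosoft-mas | mycosoft_mas/services/workflow_auto_monitor.py | _drift_detected
-- ===== SOURCE A (Python) =====
-- from typing import Callable, Dict, Any, Optional
--
-- def _drift_detected(repo: Dict[str, str], local: Dict[str, str], cloud: Dict[str, str]) -> bool:
--     """True if repo differs from local or from cloud (by name/checksum)."""
--     for name, csum in repo.items():
--         if local.get(name) != csum or cloud.get(name) != csum:
--             return True
--     # Extra workflows in local/cloud that are not in repo count as drift if we care
--     for name in set(local) | set(cloud):
--         if name not in repo and (local.get(name) or cloud.get(name)):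
--             return True
--     return False
-- ===== SOURCE B (Python) =====
-- def _drift_detected(repo, local, cloud):
--     """True if repo differs from local or from cloud (by name/checksum)."""
--     expected = set(repo.items())
--     return any(
--         {(k, v) for k, v in side.items() if k in repo or v} != expected
--         for side in (local, cloud)
--     )
-- ===== Notes on version B (the rewrite author's own statement) =====
-- stated objective: alternative
-- what changed: A's two per-name lookup loops (repo items with get() comparisons, then the union of local/cloud key sets) are replaced by a set-algebra test: for each of local and cloud, build the set of its significant items (name in repo, or truthy checksum) and compare that whole set against set(repo.items()) for equality.
import Mathlib
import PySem

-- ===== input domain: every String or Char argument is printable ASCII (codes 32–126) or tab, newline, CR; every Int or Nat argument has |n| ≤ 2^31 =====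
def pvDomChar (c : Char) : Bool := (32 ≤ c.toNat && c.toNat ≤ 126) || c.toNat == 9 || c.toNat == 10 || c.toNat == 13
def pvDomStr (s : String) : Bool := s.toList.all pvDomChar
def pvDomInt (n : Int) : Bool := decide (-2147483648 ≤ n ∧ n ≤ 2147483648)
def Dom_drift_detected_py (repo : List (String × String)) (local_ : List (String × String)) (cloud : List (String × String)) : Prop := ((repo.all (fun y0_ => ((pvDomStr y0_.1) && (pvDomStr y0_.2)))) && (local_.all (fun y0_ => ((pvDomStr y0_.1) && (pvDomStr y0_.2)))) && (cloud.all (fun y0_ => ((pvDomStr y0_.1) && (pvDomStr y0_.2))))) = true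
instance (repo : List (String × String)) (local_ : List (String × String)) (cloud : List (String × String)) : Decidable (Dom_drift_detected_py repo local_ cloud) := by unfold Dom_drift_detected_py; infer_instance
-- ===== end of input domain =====

-- B replaces A's per-name lookup loops by a set-algebra test: for each of local and
-- cloud it builds the set of "significant" items (name in repo, or truthy checksum)
-- and compares that whole set against set(repo.items()) (objective: alternative).

-- truthiness of `local.get(name)`: None and '' are falsy, any other string truthy
def pvTruthy (o : Option String) : Bool :=
  match o with
  | some s => !(s == "")
  | none => false

-- ===== PORT A =====
-- first loop of A: `for name, csum in repo.items(): if local.get(name) != csum or cloud.get(name) != csum: return True`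
def pvDriftLoop1 (local_ cloud : List (String × String)) : List (String × String) → Bool
  | [] => false
  | (name, csum) :: rest =>
      if ((PySem.Dict.mk local_).get? name != some csum) || ((PySem.Dict.mk cloud).get? name != some csum) then true
      else pvDriftLoop1 local_ cloud rest

-- second loop of A: `for name in set(local) | set(cloud): if name not in repo and (local.get(name) or cloud.get(name)): return True`
def pvDriftLoop2 (repo local_ cloud : List (String × String)) : List String → Bool
  | [] => false
  | name :: rest =>
      if (!((PySem.Dict.mk repo).contains name)) && (pvTruthy ((PySem.Dict.mk local_).get? name) || pvTruthy ((PySem.Dict.mk cloud).get? name)) then true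
      else pvDriftLoop2 repo local_ cloud rest

def drift_detected_py (repo : List (String × String)) (local_ : List (String × String)) (cloud : List (String × String)) : Bool :=
  if pvDriftLoop1 local_ cloud repo then true
  else pvDriftLoop2 repo local_ cloud
        (PySem.Set.union (PySem.Set.ofList (local_.map Prod.fst)) (PySem.Set.ofList (cloud.map Prod.fst)))

-- ===== PORT B =====
-- `{(k, v) for k, v in side.items() if k in repo or v}` of Source B
def pvSig (repo side : List (String × String)) : PySem.Set (String × String) :=
  PySem.Set.ofList (((PySem.Dict.mk side).items).filter
    (fun p => (PySem.Dict.mk repo).contains p.1 || !(p.2 == "")))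

-- `expected = set(repo.items()); any(sig(side) != expected for side in (local, cloud))`
def drift_detected_py_alt (repo : List (String × String)) (local_ : List (String × String)) (cloud : List (String × String)) : Bool :=
  let expected := PySem.Set.ofList ((PySem.Dict.mk repo).items)
  [local_, cloud].any (fun side => !(PySem.Set.equal (pvSig repo side) expected))

-- ===== PRECONDITION & SPEC =====
-- Pre_ states only the Python dict invariant (a dict cannot carry duplicate keys)
-- for all three arguments; it excludes no input a call with Python dicts can produce.
def Pre_drift_detected_py (repo : List (String × String)) (local_ : List (String × String)) (cloud : List (String × String)) : Prop :=
  (repo.map Prod.fst).Nodup ∧ (local_.map Prod.fst).Nodup ∧ (cloud.map Prod.fst).Nodup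
instance (repo : List (String × String)) (local_ : List (String × String)) (cloud : List (String × String)) : Decidable (Pre_drift_detected_py repo local_ cloud) := by unfold Pre_drift_detected_py; infer_instance

def pvWitness_drift_detected_py : (List (String × String)) × (List (String × String)) × (List (String × String)) :=
  ([("build.yml", "abc")], [("build.yml", "abc")], [])

def Spec_drift_detected_py (repo : List (String × String)) (local_ : List (String × String)) (cloud : List (String × String)) (out : Bool) : Prop := out = drift_detected_py_alt repo local_ cloud
instance (repo : List (String × String)) (local_ : List (String × String)) (cloud : List (String × String)) (out : Bool) : Decidable (Spec_drift_detected_py repo local_ cloud out) := by unfold Spec_drift_detected_py; infer_instance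

-- ===== CLAIM (what is proved, stated in full; the proofs are below) =====
def Claim_equal_drift_detected_py : Prop := ∀ (repo : List (String × String)) (local_ : List (String × String)) (cloud : List (String × String)), Dom_drift_detected_py repo local_ cloud → Pre_drift_detected_py repo local_ cloud → Spec_drift_detected_py repo local_ cloud (drift_detected_py repo local_ cloud)

-- ===== LEMMAS AND PROOFS =====

theorem pvIfTrueElse (c r : Bool) : (if c = true then true else r) = (c || r) := by
  cases c <;> simp

theorem pvLoop1_eq_any (local_ cloud : List (String × String)) (l : List (String × String)) :
    pvDriftLoop1 local_ cloud l =
      l.any (fun p => ((PySem.Dict.mk local_).get? p.1 != some p.2) || ((PySem.Dict.mk cloud).get? p.1 != some p.2)) := by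
  induction l with
  | nil => rfl
  | cons p rest ih =>
      obtain ⟨name, csum⟩ := p
      simp only [pvDriftLoop1, pvIfTrueElse, List.any_cons, ih]

theorem pvLoop2_eq_any (repo local_ cloud : List (String × String)) (l : List String) :
    pvDriftLoop2 repo local_ cloud l =
      l.any (fun name => (!((PySem.Dict.mk repo).contains name)) && (pvTruthy ((PySem.Dict.mk local_).get? name) || pvTruthy ((PySem.Dict.mk cloud).get? name))) := by
  induction l with
  | nil => rfl
  | cons name rest ih =>
      simp only [pvDriftLoop2, pvIfTrueElse, List.any_cons, ih]

-- the set-equality test of one side of B, characterised by per-name lookups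
theorem pvSide_iff (repo side : List (String × String))
    (hs : (side.map Prod.fst).Nodup) :
    PySem.Set.equal (pvSig repo side) (PySem.Set.ofList ((PySem.Dict.mk repo).items)) = true ↔
      ((∀ p ∈ repo, (PySem.Dict.mk side).get? p.1 = some p.2) ∧
       (∀ n, n ∉ repo.map Prod.fst → pvTruthy ((PySem.Dict.mk side).get? n) = false)) := by
  have hks : (PySem.Dict.mk side).keys.Nodup := by simpa using hs
  rw [PySem.Set.equal_iff]
  constructor
  · intro h
    refine ⟨?_, ?_⟩
    · intro p hp
      have hmem := (h p).mpr (by simpa [PySem.Set.mem_ofList] using hp)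
      rw [pvSig, PySem.Set.mem_ofList, List.mem_filter] at hmem
      exact PySem.Dict.get?_of_mem_items _ hmem.1 hks
    · intro n hn
      cases hg : (PySem.Dict.mk side).get? n with
      | none => simp [pvTruthy]
      | some v =>
        by_cases hv : v = ""
        · simp [pvTruthy, hv]
        · exfalso
          have hmemS : (n, v) ∈ (PySem.Dict.mk side).items :=
            PySem.Dict.mem_items_of_get?_eq_some _ hg
          have hmemR := (h (n, v)).mp (by
            rw [pvSig, PySem.Set.mem_ofList, List.mem_filter]
            exact ⟨hmemS, by simp [hv]⟩)
          rw [PySem.Set.mem_ofList] at hmemR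
          exact hn (List.mem_map_of_mem hmemR)
  · rintro ⟨h1, h2⟩ ⟨n, v⟩
    rw [pvSig, PySem.Set.mem_ofList, List.mem_filter, PySem.Set.mem_ofList]
    constructor
    · rintro ⟨hmemS, hcond⟩
      have hg : (PySem.Dict.mk side).get? n = some v :=
        PySem.Dict.get?_of_mem_items _ hmemS hks
      by_cases hc : n ∈ repo.map Prod.fst
      · obtain ⟨p, hp, hfst⟩ := List.mem_map.mp hc
        have hgp := h1 p hp
        rw [hfst, hg] at hgp
        obtain ⟨n', v'⟩ := p
        simp only at hfst
        cases hgp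
        subst hfst
        exact hp
      · have ht := h2 n hc
        rw [hg] at ht
        simp only [pvTruthy, Bool.not_eq_eq_eq_not, Bool.not_false, beq_iff_eq] at ht
        have hcf : (PySem.Dict.mk repo).contains n = false := by
          rw [← Bool.not_eq_true, PySem.Dict.contains_iff_mem_keys]
          simpa using hc
        rw [hcf, ht] at hcond
        simp at hcond
    · intro hmemR
      have hg := h1 (n, v) hmemR
      refine ⟨PySem.Dict.mem_items_of_get?_eq_some _ hg, ?_⟩
      have hc : (PySem.Dict.mk repo).contains n = true := by
        rw [PySem.Dict.contains_iff_mem_keys]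
        simpa using List.mem_map_of_mem (f := Prod.fst) hmemR
      simp [hc]

-- A returns false iff every repo item matches in local and cloud and no extra name
-- carries a truthy checksum
theorem pvA_false_iff (repo local_ cloud : List (String × String)) :
    drift_detected_py repo local_ cloud = false ↔
      ((∀ p ∈ repo, (PySem.Dict.mk local_).get? p.1 = some p.2 ∧ (PySem.Dict.mk cloud).get? p.1 = some p.2) ∧
       (∀ n, n ∉ repo.map Prod.fst →
          pvTruthy ((PySem.Dict.mk local_).get? n) = false ∧ pvTruthy ((PySem.Dict.mk cloud).get? n) = false)) := by
  unfold drift_detected_py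
  rw [pvIfTrueElse, Bool.or_eq_false_iff, pvLoop1_eq_any, pvLoop2_eq_any,
    List.any_eq_false, List.any_eq_false]
  constructor
  · rintro ⟨h1, h2⟩
    refine ⟨?_, ?_⟩
    · intro p hp
      simpa using h1 p hp
    · intro n hn
      have hcf : (PySem.Dict.mk repo).contains n = false := by
        rw [← Bool.not_eq_true, PySem.Dict.contains_iff_mem_keys]
        simpa using hn
      constructor
      · cases hg : (PySem.Dict.mk local_).get? n with
        | none => simp [pvTruthy]
        | some v =>
          by_cases hv : v = ""
          · simp [pvTruthy, hv]
          · exfalso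
            have hmemu : n ∈ PySem.Set.union (PySem.Set.ofList (local_.map Prod.fst)) (PySem.Set.ofList (cloud.map Prod.fst)) := by
              rw [PySem.Set.mem_union, PySem.Set.mem_ofList]
              left
              have : n ∈ (PySem.Dict.mk local_).keys := by
                rw [← PySem.Dict.contains_iff_mem_keys, PySem.Dict.contains_eq_isSome_get?, hg]
                rfl
              simpa using this
            have := h2 n hmemu
            rw [hcf, hg] at this
            simp [pvTruthy, hv] at this
      · cases hg : (PySem.Dict.mk cloud).get? n with
        | none => simp [pvTruthy]
        | some v =>
          by_cases hv : v = ""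
          · simp [pvTruthy, hv]
          · exfalso
            have hmemu : n ∈ PySem.Set.union (PySem.Set.ofList (local_.map Prod.fst)) (PySem.Set.ofList (cloud.map Prod.fst)) := by
              rw [PySem.Set.mem_union, PySem.Set.mem_ofList, PySem.Set.mem_ofList]
              right
              have : n ∈ (PySem.Dict.mk cloud).keys := by
                rw [← PySem.Dict.contains_iff_mem_keys, PySem.Dict.contains_eq_isSome_get?, hg]
                rfl
              simpa using this
            have := h2 n hmemu
            rw [hcf, hg] at this
            simp [pvTruthy, hv] at this
  · rintro ⟨h1, h2⟩
    refine ⟨?_, ?_⟩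
    · intro p hp
      have := h1 p hp
      simp [this.1, this.2]
    · intro n _
      by_cases hc : n ∈ repo.map Prod.fst
      · have : (PySem.Dict.mk repo).contains n = true := by
          rw [PySem.Dict.contains_iff_mem_keys]; simpa using hc
        simp [this]
      · have := h2 n hc
        simp [this.1, this.2]

-- ===== VERDICT (by name: the statement is the Claim_ definition above) =====
theorem drift_detected_py_spec : Claim_equal_drift_detected_py := by
  intro repo local_ cloud _ hpre
  obtain ⟨hr, hl, hc⟩ := hpre
  unfold Spec_drift_detected_py
  have hfalse : drift_detected_py repo local_ cloud = false ↔ drift_detected_py_alt repo local_ cloud = false := by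
    rw [pvA_false_iff]
    unfold drift_detected_py_alt
    simp only [List.any_cons, List.any_nil, Bool.or_false, Bool.or_eq_false_iff,
      Bool.not_eq_false', pvSide_iff repo local_ hl, pvSide_iff repo cloud hc]
    constructor
    · rintro ⟨h1, h2⟩
      exact ⟨⟨fun p hp => (h1 p hp).1, fun n hn => (h2 n hn).1⟩,
             ⟨fun p hp => (h1 p hp).2, fun n hn => (h2 n hn).2⟩⟩
    · rintro ⟨⟨a1, a2⟩, ⟨b1, b2⟩⟩
      exact ⟨fun p hp => ⟨a1 p hp, b1 p hp⟩, fun n hn => ⟨a2 n hn, b2 n hn⟩⟩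
  cases ha : drift_detected_py repo local_ cloud <;>
    cases hb : drift_detected_py_alt repo local_ cloud <;> simp_all
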